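-- pv_equiv track=rewrite | github.com/jzxyouok/pynotebook-youtube-editor | youtube_editor/youtube_editor.py | get_embed_string_from
-- ===== SOURCE A (Python) =====
-- def convert_to_seconds_from(timestring, delimiter=":"):
--     """Convert a timestring to seconds.
--
--     :timestring: HH:MM:SS as a str
--     :returns: seconds as int
--     """
--     return sum(
--         # raise 60 to power of i in (0, 1, 2) and
--         # multiply it by seconds, minutes and then hours
--         int(time_value) * (60 ** i)
--         for i, time_value
--         in enumerate(reversed(timestring.split(delimiter)))
--     )
--
-- def get_embed_string_from(excerpt, video_url):
--     """Create some HTML to display the YouTube video excerpts."""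
--     EMPTY_STRING = ''
--     label, times = excerpt
--     start_stop = [
--         '<br/>'.join([': '.join(item for item in items if item)])
--         for items in zip(('start', 'end'), times)
--     ]
--     start_stop = EMPTY_STRING.join(["<p>{}</p>".format(item)
--                                     for item in start_stop])\
--         if all(times) else EMPTY_STRING
--     embeded_video_template = ''.join((
--             '<h3>{label}</h3>',
--             '{start_stop}',
--             '<br/>',
--             '<iframe width="560" height="315" ',
--             'src="{video_url}?rel=0&start={start}&end={end}" ',
--             'frameborder="0" allowfullscreen></iframe>',
--     ))
--     start, end = [convert_to_seconds_from(item)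
--                   for item in times]\
--         if all(times) else times
--     if not all(times):
--         # the ?rel=0 MUST stay or the video does not load
--         # for security reasons, Chrome blocks
--         needle = '&start={start}&end={end}'
--         return embeded_video_template.replace(needle, '').format(
--             video_url=video_url,
--             label=label,
--             start_stop=start_stop,
--         )
--     return embeded_video_template.format(
--         video_url=video_url,
--         label=label,
--         start_stop=start_stop,
--         start=start,
--         end=end
--     )
-- ===== SOURCE B (Python) =====
-- def convert_to_seconds_from(timestring, delimiter=":"):
--     """Convert a timestring to seconds (Horner: one forward pass, no powers)."""
--     total = 0
--     for part in timestring.split(delimiter):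
--         total = total * 60 + int(part)
--     return total
--
--
-- def get_embed_string_from(excerpt, video_url):
--     """Create some HTML to display the YouTube video excerpts."""
--     label, times = excerpt
--     start, end = times
--     if start and end:
--         src = '{}?rel=0&start={}&end={}'.format(
--             video_url,
--             convert_to_seconds_from(start),
--             convert_to_seconds_from(end),
--         )
--         body = '<p>start: {}</p><p>end: {}</p>'.format(start, end)
--     else:
--         src = video_url + '?rel=0'
--         body = ''
--     return ('<h3>{}</h3>{}<br/><iframe width="560" height="315" '
--             'src="{}" frameborder="0" allowfullscreen></iframe>'
--             ).format(label, body, src)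
-- ===== Notes on version B (the rewrite author's own statement) =====
-- stated objective: simpler
-- what changed: convert_to_seconds_from becomes a single forward Horner pass (total = total*60 + int(part)) instead of sum over powers of 60 on the reversed split, and the embed string is built by assembling the src and body directly in each branch instead of formatting a full template and stripping the '&start={start}&end={end}' needle with .replace.
import Mathlib
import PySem

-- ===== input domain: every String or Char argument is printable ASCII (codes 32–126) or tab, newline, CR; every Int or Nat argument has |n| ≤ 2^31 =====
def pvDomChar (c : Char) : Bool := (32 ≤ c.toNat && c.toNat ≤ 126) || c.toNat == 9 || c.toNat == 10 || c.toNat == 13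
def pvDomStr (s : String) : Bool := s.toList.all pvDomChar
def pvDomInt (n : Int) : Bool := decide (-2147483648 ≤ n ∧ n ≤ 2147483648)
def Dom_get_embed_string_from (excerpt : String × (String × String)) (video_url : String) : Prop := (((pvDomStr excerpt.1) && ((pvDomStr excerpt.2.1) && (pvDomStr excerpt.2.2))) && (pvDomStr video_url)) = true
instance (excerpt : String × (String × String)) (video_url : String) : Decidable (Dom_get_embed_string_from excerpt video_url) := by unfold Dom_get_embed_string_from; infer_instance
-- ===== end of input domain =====

-- B computes the timestamp with a single forward Horner pass and assembles the embed HTML per branch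
-- instead of formatting a full template and stripping the start/end needle; same output, similar cost (objective: simpler).



-- ===== PORT A =====
-- sum(int(v) * 60**i for i, v in enumerate(reversed(timestring.split(delimiter))))
def convert_to_seconds_from (timestring : String) (delimiter : String) : Int :=
  (PySem.List.enumerate ((PySem.Str.split? timestring delimiter).getD []).reverse).foldl
    (fun acc p => acc + ((PySem.Int.ofStr? p.2).getD 0) * 60 ^ p.1.toNat) 0

def get_embed_string_from (excerpt : String × (String × String)) (video_url : String) : String :=
  -- NOTE: Python A also computes "start, end = times" in the falsy branch; these unused bindings are elided.
  let label := excerpt.1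
  let times := excerpt.2
  -- all(times): both strings truthy (nonempty)
  let ss : List String :=
    [("start", times.1), ("end", times.2)].map (fun items =>
      PySem.Str.join "<br/>" [PySem.Str.join ": " ([items.1, items.2].filter (fun item => !(item == "")))])
  let start_stop : String :=
    if times.1 ≠ "" ∧ times.2 ≠ "" then
      PySem.Str.join "" (ss.map (fun item => "<p>" ++ item ++ "</p>"))
    else ""
  if times.1 ≠ "" ∧ times.2 ≠ "" then
    let start := convert_to_seconds_from times.1 ":"
    let «end» := convert_to_seconds_from times.2 ":"
    -- embeded_video_template.format(...): str.format on the constant template, ported as direct interpolation (exact)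
    "<h3>" ++ label ++ "</h3>" ++ start_stop ++ "<br/>" ++ "<iframe width=\"560\" height=\"315\" " ++
      "src=\"" ++ video_url ++ "?rel=0&start=" ++ PySem.Int.toStr start ++ "&end=" ++ PySem.Int.toStr «end» ++ "\" " ++
      "frameborder=\"0\" allowfullscreen></iframe>"
  else
    -- embeded_video_template.replace('&start={start}&end={end}', '').format(...): the constant template with the
    -- needle removed, ported as direct interpolation of the resulting constant (exact: replace happens before format)
    "<h3>" ++ label ++ "</h3>" ++ start_stop ++ "<br/>" ++ "<iframe width=\"560\" height=\"315\" " ++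
      "src=\"" ++ video_url ++ "?rel=0\" " ++ "frameborder=\"0\" allowfullscreen></iframe>"

-- ===== PORT B =====
-- Horner: total = total*60 + int(part), one forward pass
def pvConvertAlt (timestring : String) : Int :=
  ((PySem.Str.split? timestring ":").getD []).foldl
    (fun total part => total * 60 + (PySem.Int.ofStr? part).getD 0) 0

def get_embed_string_from_alt (excerpt : String × (String × String)) (video_url : String) : String :=
  let label := excerpt.1
  let start := excerpt.2.1
  let «end» := excerpt.2.2
  if start ≠ "" ∧ «end» ≠ "" then
    let src := video_url ++ "?rel=0&start=" ++ PySem.Int.toStr (pvConvertAlt start) ++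
      "&end=" ++ PySem.Int.toStr (pvConvertAlt «end»)
    let body := "<p>start: " ++ start ++ "</p><p>end: " ++ «end» ++ "</p>"
    "<h3>" ++ label ++ "</h3>" ++ body ++ "<br/><iframe width=\"560\" height=\"315\" " ++
      "src=\"" ++ src ++ "\" frameborder=\"0\" allowfullscreen></iframe>"
  else
    "<h3>" ++ label ++ "</h3>" ++ "<br/><iframe width=\"560\" height=\"315\" " ++
      "src=\"" ++ (video_url ++ "?rel=0") ++ "\" frameborder=\"0\" allowfullscreen></iframe>"

-- ===== PRECONDITION & SPEC =====
-- Pre_ excludes exactly the inputs where Python A raises ValueError: both time strings nonempty but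
-- some ':'-separated part is not a valid int() literal.
def Pre_get_embed_string_from (excerpt : String × (String × String)) (video_url : String) : Prop :=
  (excerpt.2.1 ≠ "" ∧ excerpt.2.2 ≠ "") →
    ∀ p ∈ (PySem.Str.split? excerpt.2.1 ":").getD [] ++ (PySem.Str.split? excerpt.2.2 ":").getD [],
      (PySem.Int.ofStr? p).isSome
instance (excerpt : String × (String × String)) (video_url : String) : Decidable (Pre_get_embed_string_from excerpt video_url) := by unfold Pre_get_embed_string_from; infer_instance
def pvWitness_get_embed_string_from : (String × (String × String)) × String := (("Intro", ("0:05", "1:10")), "https://yt/v")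

def Spec_get_embed_string_from (excerpt : String × (String × String)) (video_url : String) (out : String) : Prop := out = get_embed_string_from_alt excerpt video_url
instance (excerpt : String × (String × String)) (video_url : String) (out : String) : Decidable (Spec_get_embed_string_from excerpt video_url out) := by unfold Spec_get_embed_string_from; infer_instance

-- ===== CLAIM (what is proved, stated in full; the proofs are below) =====
def Claim_equal_get_embed_string_from : Prop := ∀ (excerpt : String × (String × String)) (video_url : String), Dom_get_embed_string_from excerpt video_url → Pre_get_embed_string_from excerpt video_url → Spec_get_embed_string_from excerpt video_url (get_embed_string_from excerpt video_url)

-- ===== LEMMAS AND PROOFS =====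

-- little-endian (least-significant-first) base-60 value of a list of int-literal strings
def pvW : List String → Int
  | [] => 0
  | x :: xs => (PySem.Int.ofStr? x).getD 0 + 60 * pvW xs

theorem pvEnumSum (l : List String) (s : Nat) (acc : Int) :
    (PySem.List.enumerate l (s : Int)).foldl
      (fun acc p => acc + ((PySem.Int.ofStr? p.2).getD 0) * 60 ^ p.1.toNat) acc
    = acc + 60 ^ s * pvW l := by
  induction l generalizing s acc with
  | nil => simp [PySem.List.enumerate, pvW]
  | cons x xs ih =>
    rw [PySem.List.enumerate_cons]
    have h1 : ((s : Int) + 1) = ((s + 1 : Nat) : Int) := by push_cast; ring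
    simp only [List.foldl_cons, h1, ih, Int.toNat_natCast, pvW]
    rw [pow_succ]
    ring

theorem pvW_append (m : List String) (y : String) :
    pvW (m ++ [y]) = pvW m + 60 ^ m.length * (PySem.Int.ofStr? y).getD 0 := by
  induction m with
  | nil => simp [pvW]
  | cons x xs ih => simp [pvW, ih, pow_succ]; ring

theorem pvHorner (l : List String) (acc : Int) :
    l.foldl (fun total part => total * 60 + (PySem.Int.ofStr? part).getD 0) acc
    = acc * 60 ^ l.length + pvW l.reverse := by
  induction l generalizing acc with
  | nil => simp [pvW]
  | cons x xs ih =>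
    simp only [List.foldl_cons, ih, List.reverse_cons, pvW_append, List.length_cons,
      List.length_reverse, pow_succ]
    ring

theorem pvConv_eq (s : String) : convert_to_seconds_from s ":" = pvConvertAlt s := by
  unfold convert_to_seconds_from pvConvertAlt
  rw [pvHorner]
  simpa using pvEnumSum (((PySem.Str.split? s ":").getD []).reverse) 0 0

-- ===== VERDICT (by name: the statement is the Claim_ definition above) =====
theorem get_embed_string_from_spec : Claim_equal_get_embed_string_from := by
  intro excerpt video_url _ _
  unfold Spec_get_embed_string_from get_embed_string_from get_embed_string_from_alt
  by_cases h : excerpt.2.1 ≠ "" ∧ excerpt.2.2 ≠ ""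
  · simp only [if_pos h, pvConv_eq, List.map_cons, List.map_nil]
    have h1 : (excerpt.2.1 == "") = false := by simpa using h.1
    have h2 : (excerpt.2.2 == "") = false := by simpa using h.2
    simp only [List.filter_cons, List.filter_nil, h1, h2, Bool.not_false]
    apply String.toList_inj.mp
    simp only [PySem.Str.toList_join, List.map_cons, List.map_nil, PySem.Chars.join_singleton,
      PySem.Chars.join_cons_cons, String.toList_append]
    simp [PySem.Chars.join_cons_cons, PySem.Chars.join_singleton]
  · rw [if_neg h, if_neg h, if_neg h]
    apply String.toList_inj.mp
    simp [String.toList_append]
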